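-- pv_equiv track=rewrite | github.com/cogent3/cogent3 | src/cogent3/align/traceback.py | gap_traceback
-- ===== SOURCE A (Python) =====
-- import typing
--
-- IntOrNone = int | None
--
-- IntListType = list[int]
--
-- CoordsListType = list[list[typing.Sequence[int]]]
--
-- def gap_traceback(
--     aligned_positions: list[list[IntOrNone, IntOrNone]],
-- ) -> tuple[IntListType, IntListType, CoordsListType, int]:
--     """gap Vectors from state matrix and ending point"""
--     consuming = [False, False]
--     starts = [None, None]
--     ends = [None, None]
--     gap_vectors = [[], []]
--     for a, posn in enumerate(aligned_positions):
--         for dimension in [0, 1]: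
--             delta = posn[dimension] is not None
--             if delta:
--                 if starts[dimension] is None:
--                     starts[dimension] = posn[dimension]
--                 ends[dimension] = posn[dimension] + 1
--             if consuming[dimension] != delta:
--                 gap_vectors[dimension].append(a)
--                 consuming[dimension] = delta
--     a += 1
--     for dimension in [0, 1]:
--         gv = gap_vectors[dimension]
--         if consuming[dimension]:
--             gv.append(a)
--         gap_vectors[dimension] = [(gv[i], gv[i + 1]) for i in range(0, len(gv), 2)]
--     return starts, ends, gap_vectors, a
-- ===== SOURCE B (Python) =====
-- def gap_traceback(aligned_positions):
--     """Per-dimension passes: extract each column, take first/last aligned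
--     values for starts/ends, and build run intervals directly."""
--     n = len(aligned_positions)
--     starts, ends, gap_vectors = [], [], []
--     for dim in (0, 1):
--         col = [row[dim] for row in aligned_positions]
--         first = next((v for v in col if v is not None), None)
--         last = next((v for v in reversed(col) if v is not None), None)
--         starts.append(first)
--         ends.append(None if last is None else last + 1)
--         runs = []
--         run_start = None
--         for i, v in enumerate(col):
--             if v is not None:
--                 if run_start is None:
--                     run_start = i
--             elif run_start is not None:
--                 runs.append((run_start, i))
--                 run_start = None
--         if run_start is not None:
--             runs.append((run_start, n))
--         gap_vectors.append(runs)
--     return starts, ends, gap_vectors, n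
-- ===== Notes on version B (the rewrite author's own statement) =====
-- stated objective: simpler
-- what changed: B processes each dimension in its own pass over the extracted column, taking the first/last aligned values for starts/ends and appending run intervals directly, instead of A's single interleaved loop that records toggle boundaries and pairs them up with a stride-2 comprehension; Pre_ excludes the empty list (A raises UnboundLocalError on the final a += 1) and rows shorter than 2 (A raises IndexError at posn[dimension]).
import Mathlib
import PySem

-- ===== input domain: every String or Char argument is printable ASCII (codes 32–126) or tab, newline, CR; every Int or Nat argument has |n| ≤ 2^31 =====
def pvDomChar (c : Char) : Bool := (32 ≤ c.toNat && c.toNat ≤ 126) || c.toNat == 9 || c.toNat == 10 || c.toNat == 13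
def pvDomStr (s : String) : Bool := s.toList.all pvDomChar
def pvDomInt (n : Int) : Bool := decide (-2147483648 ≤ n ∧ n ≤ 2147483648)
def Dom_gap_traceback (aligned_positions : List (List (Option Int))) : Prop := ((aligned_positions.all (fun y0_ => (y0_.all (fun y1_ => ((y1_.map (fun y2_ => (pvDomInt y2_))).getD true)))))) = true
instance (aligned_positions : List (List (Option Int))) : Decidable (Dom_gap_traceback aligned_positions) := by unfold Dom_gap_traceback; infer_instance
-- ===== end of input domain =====

-- B replaces A's interleaved boundary-list construction (toggle points paired up
-- by a stride-2 comprehension) with independent per-dimension passes that build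
-- the run intervals directly; objective: simpler. Equality is claimed on
-- nonempty inputs whose rows have length ≥ 2 (elsewhere Python A raises).

-- ===== PORT A =====
-- inner-loop body of A, for one dimension (state: consuming, start, end, boundary list)
def dimStepA (a : Int) (p : Option Int) (c : Bool) (s e : Option Int) (g : List Int) :
    Bool × Option Int × Option Int × List Int :=
  let delta := p.isSome
  let s' := if delta then (if s = none then p else s) else s
  let e' := if delta then p.map (· + 1) else e
  if c != delta then (delta, s', e', g ++ [a]) else (c, s', e', g)

-- A's closing comprehension [(gv[i], gv[i+1]) for i in range(0, len(gv), 2)];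
-- exact for even-length gv (the loop's toggling always leaves gv even, so the
-- odd case — where Python would raise IndexError — is unreachable).
def pairUpA : List Int → List (Int × Int)
  | x :: y :: rest => (x, y) :: pairUpA rest
  | _ => []

def gap_traceback (aligned_positions : List (List (Option Int))) :
    List (Option Int) × List (Option Int) × (List (List (Int × Int))) × Int :=
  let st := (PySem.List.enumerate aligned_positions 0).foldl
    (fun st p =>
      (dimStepA p.1 (p.2.getD 0 none) st.1.1 st.1.2.1 st.1.2.2.1 st.1.2.2.2,
       dimStepA p.1 (p.2.getD 1 none) st.2.1.1 st.2.1.2.1 st.2.1.2.2.1 st.2.1.2.2.2,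
       p.1))
    (((false, none, none, []) : Bool × Option Int × Option Int × List Int),
     ((false, none, none, []) : Bool × Option Int × Option Int × List Int),
     (-1 : Int))
  let a := st.2.2 + 1
  let fin := fun (d : Bool × Option Int × Option Int × List Int) =>
    pairUpA (if d.1 then d.2.2.2 ++ [a] else d.2.2.2)
  ([st.1.2.1, st.2.1.2.1], [st.1.2.2.1, st.2.1.2.2.1], [fin st.1, fin st.2.1], a)

-- ===== PORT B =====
def colB (xs : List (List (Option Int))) (d : Nat) : List (Option Int) :=
  xs.map (fun row => row.getD d none)

-- next((v for v in col if v is not None), None)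
def firstSomeB : List (Option Int) → Option Int
  | [] => none
  | some v :: _ => some v
  | none :: rest => firstSomeB rest

def runStepB (st : List (Int × Int) × Option Int) (p : Int × Option Int) :
    List (Int × Int) × Option Int :=
  match p.2, st.2 with
  | some _, none => (st.1, some p.1)
  | none, some r => (st.1 ++ [(r, p.1)], none)
  | _, _ => st

def runsB (col : List (Option Int)) (n : Int) : List (Int × Int) :=
  let br := (PySem.List.enumerate col 0).foldl runStepB ([], none)
  match br.2 with
  | some r => br.1 ++ [(r, n)]
  | none => br.1

def dimB (xs : List (List (Option Int))) (d : Nat) (n : Int) :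
    Option Int × Option Int × List (Int × Int) :=
  let col := colB xs d
  (firstSomeB col, (firstSomeB col.reverse).map (· + 1), runsB col n)

def gap_traceback_alt (aligned_positions : List (List (Option Int))) :
    List (Option Int) × List (Option Int) × (List (List (Int × Int))) × Int :=
  let n : Int := aligned_positions.length
  let d0 := dimB aligned_positions 0 n
  let d1 := dimB aligned_positions 1 n
  ([d0.1, d1.1], [d0.2.1, d1.2.1], [d0.2.2, d1.2.2], n)

-- ===== PRECONDITION & SPEC =====
-- Pre_ excludes exactly the inputs where A raises: the empty list (UnboundLocalError
-- on the final 'a += 1') and rows of length < 2 (IndexError at posn[dimension]).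
def Pre_gap_traceback (aligned_positions : List (List (Option Int))) : Prop :=
  aligned_positions ≠ [] ∧ ∀ row ∈ aligned_positions, 2 ≤ row.length
instance (aligned_positions : List (List (Option Int))) : Decidable (Pre_gap_traceback aligned_positions) := by unfold Pre_gap_traceback; infer_instance

def pvWitness_gap_traceback : List (List (Option Int)) :=
  [[some 0, none], [some 1, some 2], [none, some 3]]

def Spec_gap_traceback (aligned_positions : List (List (Option Int))) (out : List (Option Int) × List (Option Int) × (List (List (Int × Int))) × Int) : Prop := out = gap_traceback_alt aligned_positions
instance (aligned_positions : List (List (Option Int))) (out : List (Option Int) × List (Option Int) × (List (List (Int × Int))) × Int) : Decidable (Spec_gap_traceback aligned_positions out) := by unfold Spec_gap_traceback; infer_instance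

-- ===== CLAIM (what is proved, stated in full; the proofs are below) =====
def Claim_equal_gap_traceback : Prop := ∀ (aligned_positions : List (List (Option Int))), Dom_gap_traceback aligned_positions → Pre_gap_traceback aligned_positions → Spec_gap_traceback aligned_positions (gap_traceback aligned_positions)

-- ===== LEMMAS AND PROOFS =====

-- proof-only decomposition of A's inner-loop body
def sStep (s : Option Int) (p : Option Int) : Option Int :=
  if p.isSome then (if s = none then p else s) else s
def eStep (e : Option Int) (p : Option Int) : Option Int :=
  if p.isSome then p.map (· + 1) else e
def cgStep (a : Int) (p : Option Int) (st : Bool × List Int) : Bool × List Int :=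
  if st.1 != p.isSome then (p.isSome, st.2 ++ [a]) else st
def flatPairs (l : List (Int × Int)) : List Int := l.flatMap (fun q => [q.1, q.2])
def tailRun : Option Int → List Int
  | some r => [r]
  | none => []

theorem dimStepA_split (a : Int) (p : Option Int) (c : Bool) (s e : Option Int) (g : List Int) :
    dimStepA a p c s e g =
      ((cgStep a p (c, g)).1, sStep s p, eStep e p, (cgStep a p (c, g)).2) := by
  simp only [dimStepA, cgStep, sStep, eStep]
  split_ifs <;> rfl

theorem foldl_triple (l : List (Int × List (Option Int)))
    (x y : Bool × Option Int × Option Int × List Int) (a0 : Int) :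
    l.foldl (fun st p =>
      (dimStepA p.1 (p.2.getD 0 none) st.1.1 st.1.2.1 st.1.2.2.1 st.1.2.2.2,
       dimStepA p.1 (p.2.getD 1 none) st.2.1.1 st.2.1.2.1 st.2.1.2.2.1 st.2.1.2.2.2,
       p.1)) (x, y, a0)
    = (l.foldl (fun st p => dimStepA p.1 (p.2.getD 0 none) st.1 st.2.1 st.2.2.1 st.2.2.2) x,
       l.foldl (fun st p => dimStepA p.1 (p.2.getD 1 none) st.1 st.2.1 st.2.2.1 st.2.2.2) y,
       l.foldl (fun _ p => p.1) a0) := by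
  induction l generalizing x y a0 with
  | nil => rfl
  | cons h t ih =>
      simp only [List.foldl_cons]
      exact ih _ _ _

theorem enumerate_map_col (xs : List (List (Option Int))) (d : Nat) (s : Int) :
    PySem.List.enumerate (colB xs d) s
      = (PySem.List.enumerate xs s).map (fun p => (p.1, p.2.getD d none)) := by
  induction xs generalizing s with
  | nil => rfl
  | cons h t ih =>
      simp [colB, PySem.List.enumerate_cons] at *
      simpa [colB] using ih (s + 1)

theorem comp_split (l : List (Int × Option Int)) (c : Bool) (s e : Option Int) (g : List Int) :
    l.foldl (fun st p => dimStepA p.1 p.2 st.1 st.2.1 st.2.2.1 st.2.2.2) (c, s, e, g)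
    = ((l.foldl (fun st p => cgStep p.1 p.2 st) (c, g)).1,
       (l.map (·.2)).foldl sStep s,
       (l.map (·.2)).foldl eStep e,
       (l.foldl (fun st p => cgStep p.1 p.2 st) (c, g)).2) := by
  induction l generalizing c s e g with
  | nil => rfl
  | cons h t ih =>
      simp only [List.foldl_cons, List.map_cons]
      rw [dimStepA_split h.1 h.2 c s e g]
      simpa using ih (cgStep h.1 h.2 (c, g)).1 (sStep s h.2) (eStep e h.2) (cgStep h.1 h.2 (c, g)).2

theorem sfold_eq (l : List (Option Int)) (s : Option Int) :
    l.foldl sStep s = if s = none then firstSomeB l else s := by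
  induction l generalizing s with
  | nil => cases s <;> rfl
  | cons h t ih =>
      cases h <;> cases s <;> simp [List.foldl_cons, sStep, firstSomeB, ih]

theorem firstSomeB_append (l1 l2 : List (Option Int)) :
    firstSomeB (l1 ++ l2)
      = match firstSomeB l1 with | some v => some v | none => firstSomeB l2 := by
  induction l1 with
  | nil => rfl
  | cons h t ih => cases h <;> simp [firstSomeB, ih]

theorem efold_eq (l : List (Option Int)) (e : Option Int) :
    l.foldl eStep e
      = match firstSomeB l.reverse with | some v => some (v + 1) | none => e := by
  induction l generalizing e with
  | nil => rfl
  | cons h t ih =>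
      cases h with
      | none =>
          simp only [List.foldl_cons, List.reverse_cons, firstSomeB_append]
          rw [eStep]; simp only [Option.isSome_none, Bool.false_eq_true, if_false]
          rw [ih]
          cases firstSomeB t.reverse <;> rfl
      | some v =>
          simp only [List.foldl_cons, List.reverse_cons, firstSomeB_append]
          rw [eStep]; simp only [Option.isSome_some, if_true, Option.map_some]
          rw [ih]
          cases firstSomeB t.reverse <;> rfl

theorem cg_inv (l : List (Int × Option Int)) (c : Bool) (g : List Int)
    (acc : List (Int × Int)) (rs : Option Int)
    (hc : c = rs.isSome) (hg : g = flatPairs acc ++ tailRun rs) :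
    (l.foldl (fun st p => cgStep p.1 p.2 st) (c, g)).1
      = (l.foldl runStepB (acc, rs)).2.isSome
    ∧ (l.foldl (fun st p => cgStep p.1 p.2 st) (c, g)).2
      = flatPairs (l.foldl runStepB (acc, rs)).1 ++ tailRun (l.foldl runStepB (acc, rs)).2 := by
  induction l generalizing c g acc rs with
  | nil => subst hc hg; exact ⟨rfl, rfl⟩
  | cons h t ih =>
      obtain ⟨i, v⟩ := h
      subst hc hg
      cases v with
      | some w =>
          cases rs with
          | none =>
              simp only [List.foldl_cons]
              refine ih _ _ acc (some i) ?_ ?_ <;> simp [tailRun]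
          | some r =>
              simp only [List.foldl_cons]
              refine ih _ _ acc (some r) ?_ ?_ <;> simp
      | none =>
          cases rs with
          | none =>
              simp only [List.foldl_cons]
              refine ih _ _ acc none ?_ ?_ <;> simp
          | some r =>
              simp only [List.foldl_cons]
              refine ih _ _ (acc ++ [(r, i)]) none ?_ ?_ <;>
                simp [flatPairs, tailRun]

theorem pairUpA_flat (acc : List (Int × Int)) (rest : List Int) :
    pairUpA (flatPairs acc ++ rest) = acc ++ pairUpA rest := by
  induction acc with
  | nil => rfl
  | cons h t ih => simp [flatPairs, pairUpA] at *; simpa [pairUpA] using ih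

theorem last_idx (xs : List (List (Option Int))) (s a0 : Int) (h : xs ≠ []) :
    (PySem.List.enumerate xs s).foldl (fun _ p => p.1) a0 = s + xs.length - 1 := by
  induction xs generalizing s a0 with
  | nil => exact absurd rfl h
  | cons x t ih =>
      simp only [PySem.List.enumerate_cons, List.foldl_cons]
      cases t with
      | nil => simp [PySem.List.enumerate_nil]
      | cons y u =>
          rw [ih (s + 1) s (List.cons_ne_nil y u)]
          push_cast [List.length_cons]; ring

-- one-dimension summary: A's fold over the enumerated column equals B's pieces
theorem dim_eq (xs : List (List (Option Int))) (d : Nat) (n : Int) :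
    (let st := (PySem.List.enumerate xs 0).foldl
        (fun st p => dimStepA p.1 (p.2.getD d none) st.1 st.2.1 st.2.2.1 st.2.2.2)
        (false, none, none, [])
     (st.2.1, st.2.2.1, pairUpA (if st.1 then st.2.2.2 ++ [n] else st.2.2.2)))
    = dimB xs d n := by
  have hEnum : (PySem.List.enumerate xs 0).foldl
      (fun st p => dimStepA p.1 (p.2.getD d none) st.1 st.2.1 st.2.2.1 st.2.2.2)
      (false, none, none, [])
      = (PySem.List.enumerate (colB xs d) 0).foldl
          (fun st p => dimStepA p.1 p.2 st.1 st.2.1 st.2.2.1 st.2.2.2)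
          (false, none, none, []) := by
    rw [enumerate_map_col, List.foldl_map]
  rw [hEnum, comp_split]
  have hmap : ((PySem.List.enumerate (colB xs d) 0).map (·.2)) = colB xs d :=
    PySem.List.map_snd_enumerate _ _
  obtain ⟨h1, h2⟩ := cg_inv (PySem.List.enumerate (colB xs d) 0) false [] [] none rfl rfl
  simp only [dimB, hmap, sfold_eq, efold_eq, h1, h2]
  rw [Prod.mk.injEq, Prod.mk.injEq]
  refine ⟨by simp, ?_, ?_⟩
  · cases firstSomeB (colB xs d).reverse <;> rfl
  · cases hrs : ((PySem.List.enumerate (colB xs d) 0).foldl runStepB ([], none)).2 with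
    | none =>
        simp only [hrs, Option.isSome_none, Bool.false_eq_true, if_false, tailRun,
          List.append_nil, runsB]
        simpa [pairUpA] using
          pairUpA_flat ((PySem.List.enumerate (colB xs d)).foldl runStepB ([], none)).1 []
    | some r =>
        simp only [Option.isSome_some, if_true, tailRun, runsB, hrs]
        rw [List.append_assoc]
        simpa [pairUpA] using pairUpA_flat _ [r, n]

-- ===== VERDICT (by name: the statement is the Claim_ definition above) =====
theorem gap_traceback_spec : Claim_equal_gap_traceback := by
  intro xs _ hpre
  obtain ⟨hne, _⟩ := hpre
  show gap_traceback xs = gap_traceback_alt xs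
  have ha : (PySem.List.enumerate xs 0).foldl (fun _ p => p.1) (-1) + 1 = (xs.length : Int) := by
    rw [last_idx xs 0 (-1) hne]; ring
  have h0 := dim_eq xs 0 (xs.length : Int)
  have h1 := dim_eq xs 1 (xs.length : Int)
  simp only at h0 h1
  simp only [gap_traceback, gap_traceback_alt, foldl_triple, ha]
  rw [← h0, ← h1]
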